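-- pv_equiv track=rewrite | github.com/salar96/LearningFLPO | utils.py | num_flpo_routes
-- ===== SOURCE A (Python) =====
-- def num_flpo_routes(n_facilities, n_drones):
--     n_int_stages = n_facilities + 1
--     n_routes_flip = [[]] * n_int_stages
--
--     for i in range(n_int_stages):
--         if i == 0:
--             n_routes_flip[i] = [1] * (n_facilities + 1)
--         elif i > 0 and i < n_int_stages - 1:
--             n_routes_flip[i] = [sum(n_routes_flip[i - 1])] * n_facilities
--             n_routes_flip[i].append(1)  # only one path from stopping state
--         elif i == n_int_stages - 1:
--             n_routes_flip[i] = [sum(n_routes_flip[i - 1])] * n_drones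
--
--     return n_routes_flip[::-1]
-- ===== SOURCE B (Python) =====
-- def num_flpo_routes(n_facilities, n_drones):
--     if n_facilities < 0:
--         return []
--     if n_facilities == 0:
--         return [[1]]
--     # pass 1: scalar recurrence of stage fill-values (row sums)
--     s = [n_facilities + 1]
--     for _ in range(n_facilities - 1):
--         s.append(s[-1] * n_facilities + 1)
--     # pass 2: assemble the reversed table directly, back-to-front
--     out = [[s[-1]] * n_drones]
--     for v in reversed(s[:-1]):
--         out.append([v] * n_facilities + [1])
--     out.append([1] * (n_facilities + 1))
--     return out
-- ===== Notes on version B (the rewrite author's own statement) =====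
-- stated objective: alternative
-- what changed: Instead of building each row and re-summing the previous full row at every stage, B first computes the stage fill-values by the scalar recurrence s0=n_facilities+1, s_{k+1}=s_k*n_facilities+1 in one pass, then assembles the already-reversed table back-to-front from those scalars in a second pass.
import Mathlib
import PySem

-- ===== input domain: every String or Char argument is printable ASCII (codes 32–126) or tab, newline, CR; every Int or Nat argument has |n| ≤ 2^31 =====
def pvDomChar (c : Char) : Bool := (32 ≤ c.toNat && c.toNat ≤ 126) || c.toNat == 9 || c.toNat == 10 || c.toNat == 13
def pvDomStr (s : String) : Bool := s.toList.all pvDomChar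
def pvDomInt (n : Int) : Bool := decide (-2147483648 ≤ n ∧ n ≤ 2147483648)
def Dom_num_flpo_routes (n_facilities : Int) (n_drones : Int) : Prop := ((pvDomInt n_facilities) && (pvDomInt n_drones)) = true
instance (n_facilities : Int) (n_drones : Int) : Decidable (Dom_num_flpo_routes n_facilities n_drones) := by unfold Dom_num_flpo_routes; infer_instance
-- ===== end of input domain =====

-- B replaces A's per-stage row summation with a scalar recurrence of the stage fill-values
-- followed by a separate back-to-front assembly of the reversed table (objective: alternative decomposition).

-- ===== PORT A =====
-- loop body of A's stage loop ([x]*k ports as List.replicate k.toNat x, exact for Python's list repeat;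
-- st[i-1] ports as pyGetD st (i-1) [], exact here since i-1 is always in range)
def pvStepA (n_facilities : Int) (n_drones : Int) (n_int_stages : Int)
    (st : List (List Int)) (i : Int) : List (List Int) :=
  if i = 0 then
    st.set i.toNat (List.replicate (n_facilities + 1).toNat 1)
  else if 0 < i ∧ i < n_int_stages - 1 then
    st.set i.toNat (List.replicate n_facilities.toNat (PySem.List.pyGetD st (i - 1) []).sum ++ [1])
  else if i = n_int_stages - 1 then
    st.set i.toNat (List.replicate n_drones.toNat (PySem.List.pyGetD st (i - 1) []).sum)
  else st

def num_flpo_routes (n_facilities : Int) (n_drones : Int) : List (List Int) :=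
  let n_int_stages := n_facilities + 1
  let init : List (List Int) := List.replicate n_int_stages.toNat []
  let final := (PySem.List.pyRange 0 n_int_stages 1).foldl
    (pvStepA n_facilities n_drones n_int_stages) init
  (PySem.List.slice? final none none (-1)).getD []   -- n_routes_flip[::-1]

-- ===== PORT B =====
def num_flpo_routes_alt (n_facilities : Int) (n_drones : Int) : List (List Int) :=
  if n_facilities < 0 then []
  else if n_facilities = 0 then [[1]]
  else
    -- pass 1: scalar recurrence of the stage fill-values (row sums); s[-1] ports as pyGetD s (-1) 0
    let s := (List.range (n_facilities - 1).toNat).foldl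
      (fun s _ => s ++ [PySem.List.pyGetD s (-1) 0 * n_facilities + 1]) [n_facilities + 1]
    -- pass 2: assemble the reversed table directly, back-to-front; reversed(s[:-1]) ports as (slice …).reverse
    let out := [List.replicate n_drones.toNat (PySem.List.pyGetD s (-1) 0)]
    let out := (PySem.List.slice s none (some (-1))).reverse.foldl
      (fun out v => out ++ [List.replicate n_facilities.toNat v ++ [1]]) out
    out ++ [List.replicate (n_facilities + 1).toNat 1]

-- ===== PRECONDITION & SPEC =====
def Spec_num_flpo_routes (n_facilities : Int) (n_drones : Int) (out : List (List Int)) : Prop := out = num_flpo_routes_alt n_facilities n_drones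
instance (n_facilities : Int) (n_drones : Int) (out : List (List Int)) : Decidable (Spec_num_flpo_routes n_facilities n_drones out) := by unfold Spec_num_flpo_routes; infer_instance

-- ===== CLAIM (what is proved, stated in full; the proofs are below) =====
def Claim_equal_num_flpo_routes : Prop := ∀ (n_facilities : Int) (n_drones : Int), Dom_num_flpo_routes n_facilities n_drones → Spec_num_flpo_routes n_facilities n_drones (num_flpo_routes n_facilities n_drones)

-- ===== LEMMAS AND PROOFS =====

-- the stage fill-values: pvSv nf k = sum of row k of the (flipped) table
def pvSv (nf : Int) : Nat → Int
  | 0 => nf + 1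
  | k + 1 => pvSv nf k * nf + 1

-- the table A builds before its final reverse, for n_facilities = n ≥ 1
def pvRows (n : Nat) (nd : Int) : List (List Int) :=
  List.replicate (n + 1) (1 : Int)
    :: (List.map (fun k => List.replicate n (pvSv (n : Int) k) ++ [1]) (List.range (n - 1))
    ++ [List.replicate nd.toNat (pvSv (n : Int) (n - 1))])

lemma pvRows_length (n : Nat) (hn : 1 ≤ n) (nd : Int) : (pvRows n nd).length = n + 1 := by
  simp [pvRows]; omega

lemma pvRows_getD_zero (n : Nat) (nd : Int) :
    (pvRows n nd).getD 0 [] = List.replicate (n + 1) (1 : Int) := by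
  simp [pvRows]

lemma pvRows_getD_succ (n : Nat) (nd : Int) (k : Nat) (h : k < n - 1) :
    (pvRows n nd).getD (k + 1) [] = List.replicate n (pvSv (n : Int) k) ++ [1] := by
  have h1 : k < (List.map (fun k => List.replicate n (pvSv (n : Int) k) ++ [1]) (List.range (n - 1))).length := by
    simpa using h
  simp only [pvRows, List.getD, List.getElem?_cons_succ, List.getElem?_append_left h1]
  simp [h]

lemma pvRows_getD_last (n : Nat) (hn : 1 ≤ n) (nd : Int) :
    (pvRows n nd).getD n [] = List.replicate nd.toNat (pvSv (n : Int) (n - 1)) := by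
  obtain ⟨k, rfl⟩ : ∃ k, n = k + 1 := ⟨n - 1, by omega⟩
  simp [pvRows]

lemma pvRows_sum (n : Nat) (hn : 1 ≤ n) (nd : Int) (m : Nat) (hm : m < n) :
    ((pvRows n nd).getD m []).sum = pvSv (n : Int) m := by
  cases m with
  | zero => rw [pvRows_getD_zero]; simp [pvSv, List.sum_replicate]
  | succ k =>
      rw [pvRows_getD_succ n nd k (by omega)]
      simp [pvSv, List.sum_replicate]; ring

lemma pyGetD_nat (xs : List (List Int)) (m : Nat) (h : m < xs.length) :
    PySem.List.pyGetD xs (m : Int) [] = xs.getD m [] := by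
  rw [PySem.List.pyGetD_eq_getElem] <;> simp [h]

lemma pvSet_concat {α : Type} (l1 t : List α) (j : Nat) (x a : α) (h : l1.length = j) :
    (l1 ++ a :: t).set j x = l1 ++ x :: t := by
  subst h
  rw [List.set_append_right _ _ (le_refl _)]
  simp

lemma pvA_inv (n : Nat) (hn : 1 ≤ n) (nd : Int) (m : Nat) (hm : m ≤ n) :
    (PySem.List.pyRange 0 ((m : Int) + 1) 1).foldl
      (pvStepA (n : Int) nd ((n : Int) + 1)) (List.replicate (n + 1) ([] : List Int))
      = (pvRows n nd).take (m + 1) ++ List.replicate (n - m) [] := by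
  induction m with
  | zero =>
      rw [show ((0 : Nat) : Int) + 1 = 0 + 1 from by norm_num,
        PySem.List.pyRange_one_singleton]
      simp only [List.foldl_cons, List.foldl_nil, pvStepA]
      obtain ⟨k, rfl⟩ : ∃ k, n = k + 1 := ⟨n - 1, by omega⟩
      simp [pvRows]
      rfl
  | succ m ih =>
      have hm' : m ≤ n := by omega
      have hsplit : PySem.List.pyRange 0 ((↑(m+1) : Int) + 1) 1
          = PySem.List.pyRange 0 ((m : Int) + 1) 1 ++ [(m : Int) + 1] := by
        push_cast
        rw [← PySem.List.pyRange_one_succ_right (by positivity)]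
      rw [hsplit, List.foldl_append, ih hm']
      set st := (pvRows n nd).take (m + 1) ++ List.replicate (n - m) [] with hst
      have hlen : st.length = n + 1 := by
        simp [hst, pvRows_length n hn nd]
        omega
      have hsetlen : (List.take (m + 1) (pvRows n nd)).length = m + 1 := by
        rw [List.length_take, pvRows_length n hn nd]; omega
      have hget : PySem.List.pyGetD st ((m : Int) + 1 - 1) [] = (pvRows n nd).getD m [] := by
        rw [show ((m : Int) + 1 - 1) = (m : Nat) from by ring,
          pyGetD_nat st m (by omega), hst]
        rw [List.getD_eq_getElem?_getD, List.getElem?_append_left (by rw [hsetlen]; omega),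
          List.getElem?_take_of_lt (by omega), ← List.getD_eq_getElem?_getD]
      have htoNat : ((m : Int) + 1).toNat = m + 1 := by omega
      by_cases hmid : m + 1 < n
      · -- middle row
        have : pvStepA (n : Int) nd ((n : Int) + 1) st ((m : Int) + 1)
            = st.set (m+1) (List.replicate n (pvSv (n : Int) m) ++ [1]) := by
          rw [pvStepA, if_neg (by omega), if_pos (by omega), htoNat,
            hget, pvRows_sum n hn nd m (by omega)]
          norm_num
        simp only [List.foldl_cons, List.foldl_nil]
        obtain ⟨k, hk⟩ : ∃ k, n - m = k + 1 := ⟨n - m - 1, by omega⟩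
        have hrow : (pvRows n nd)[m+1]'(by rw [pvRows_length n hn nd]; omega)
            = List.replicate n (pvSv (n : Int) m) ++ [1] := by
          have h2 := pvRows_getD_succ n nd m (by omega)
          rwa [List.getD_eq_getElem?_getD, List.getElem?_eq_getElem (by rw [pvRows_length n hn nd]; omega), Option.getD_some] at h2
        have hrhs : List.take (m+1+1) (pvRows n nd)
            = List.take (m+1) (pvRows n nd) ++ [List.replicate n (pvSv (n : Int) m) ++ [1]] := by
          rw [List.take_add_one, List.getElem?_eq_getElem (by rw [pvRows_length n hn nd]; omega), hrow]
          rfl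
        rw [this, hst, hk, List.replicate_succ, pvSet_concat _ _ _ _ _ hsetlen, hrhs,
          show n - (m+1) = k from by omega]
        simp
      · -- last row: m + 1 = n
        have hmn : m + 1 = n := by omega
        have : pvStepA (n : Int) nd ((n : Int) + 1) st ((m : Int) + 1)
            = st.set (m+1) (List.replicate nd.toNat (pvSv (n : Int) (n - 1))) := by
          rw [pvStepA, if_neg (by omega), if_neg (by omega),
            if_pos (by omega), htoNat, hget,
            show m = n - 1 from by omega, pvRows_sum n hn nd (n-1) (by omega)]
        simp only [List.foldl_cons, List.foldl_nil]
        obtain ⟨k, hk⟩ : ∃ k, n - m = k + 1 := ⟨n - m - 1, by omega⟩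
        have hrow : (pvRows n nd)[m+1]'(by rw [pvRows_length n hn nd]; omega)
            = List.replicate nd.toNat (pvSv (n : Int) (n - 1)) := by
          have h2 := pvRows_getD_last n hn nd
          rw [List.getD_eq_getElem?_getD, List.getElem?_eq_getElem (by rw [pvRows_length n hn nd]; omega), Option.getD_some] at h2
          have heq : (pvRows n nd)[m+1]'(by rw [pvRows_length n hn nd]; omega)
              = (pvRows n nd)[n]'(by rw [pvRows_length n hn nd]; omega) := by simp [hmn]
          rw [heq]
          exact h2
        have hrhs : List.take (m+1+1) (pvRows n nd)
            = List.take (m+1) (pvRows n nd) ++ [List.replicate nd.toNat (pvSv (n : Int) (n - 1))] := by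
          rw [List.take_add_one, List.getElem?_eq_getElem (by rw [pvRows_length n hn nd]; omega), hrow]
          rfl
        rw [this, hst, hk, List.replicate_succ, pvSet_concat _ _ _ _ _ hsetlen, hrhs,
          show n - (m+1) = k from by omega]
        simp

lemma pvA_eq (n : Nat) (hn : 1 ≤ n) (nd : Int) :
    num_flpo_routes (n : Int) nd = (pvRows n nd).reverse := by
  show (PySem.List.slice? _ none none (-1)).getD [] = _
  have h1 : ((n : Int) + 1).toNat = n + 1 := by omega
  have h2 := pvA_inv n hn nd n (le_refl n)
  rw [h1, h2, Nat.sub_self, List.replicate_zero, List.append_nil,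
    List.take_of_length_le (by rw [pvRows_length n hn nd]),
    PySem.List.slice?_none_none_neg_one, Option.getD_some]

lemma pvB_s (n : Nat) (j : Nat) :
    (List.range j).foldl
      (fun s _ => s ++ [PySem.List.pyGetD s (-1) 0 * (n : Int) + 1]) [(n : Int) + 1]
      = (List.range (j + 1)).map (pvSv (n : Int)) := by
  induction j with
  | zero => simp [pvSv]
  | succ j ih =>
      rw [List.range_succ, List.foldl_append, ih, List.foldl_cons, List.foldl_nil]
      conv_lhs => rw [List.range_succ, List.map_append]
      rw [show (List.range (j + 1 + 1)) = List.range (j + 1) ++ [j + 1] from List.range_succ,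
        List.map_append]
      congr 1
      · rw [List.range_succ, List.map_append]
      · simp [PySem.List.pyGetD, pvSv]

lemma pvFold_append {α β : Type} (g : β → α) (l : List β) (init : List α) :
    l.foldl (fun out v => out ++ [g v]) init = init ++ l.map g := by
  induction l generalizing init with
  | nil => simp
  | cons x xs ih => simp [ih]

lemma pvB_eq (n : Nat) (hn : 1 ≤ n) (nd : Int) :
    num_flpo_routes_alt (n : Int) nd = (pvRows n nd).reverse := by
  rw [num_flpo_routes_alt, if_neg (by exact not_lt.mpr (by positivity)),
    if_neg (by exact_mod_cast by omega)]
  have h0 : ((n : Int) - 1).toNat = n - 1 := by omega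
  have h1 : (n - 1) + 1 = n := by omega
  rw [h0, pvB_s n (n - 1), h1]
  obtain ⟨k, rfl⟩ : ∃ k, n = k + 1 := ⟨n - 1, by omega⟩
  have hlast : PySem.List.pyGetD ((List.range (k + 1)).map (pvSv ((k:Int) + 1))) (-1) 0
      = pvSv ((k:Int) + 1) k := by
    rw [List.range_succ, List.map_append]
    simp [PySem.List.pyGetD]
  have hdrop : PySem.List.slice ((List.range (k + 1)).map (pvSv ((k:Int) + 1))) none (some (-1))
      = (List.range k).map (pvSv ((k:Int) + 1)) := by
    rw [PySem.List.slice_to_neg_one, List.range_succ, List.map_append]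
    simp
  push_cast
  rw [hlast, hdrop, pvFold_append]
  rw [pvRows]
  simp [List.map_reverse, List.map_map]
  omega

-- ===== VERDICT (by name: the statement is the Claim_ definition above) =====
theorem num_flpo_routes_spec : Claim_equal_num_flpo_routes := by
  intro nf nd _
  unfold Spec_num_flpo_routes
  rcases lt_trichotomy nf 0 with h | h | h
  · rw [num_flpo_routes_alt, if_pos h]
    show (PySem.List.slice? _ none none (-1)).getD [] = _
    rw [PySem.List.pyRange_one_eq_nil (by omega), List.foldl_nil,
      show (nf + 1).toNat = 0 from by omega, List.replicate_zero,
      PySem.List.slice?_none_none_neg_one]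
    rfl
  · subst h
    show (PySem.List.slice? _ none none (-1)).getD [] = _
    rw [show (0 : Int) + 1 = 0 + 1 from rfl, PySem.List.pyRange_one_cons (by norm_num),
      PySem.List.pyRange_one_eq_nil (by norm_num)]
    simp [pvStepA, num_flpo_routes_alt, PySem.List.slice?_none_none_neg_one]
  · obtain ⟨n, rfl⟩ := Int.eq_ofNat_of_zero_le h.le
    have hn : 1 ≤ n := by exact_mod_cast h
    rw [pvA_eq n hn nd, pvB_eq n hn nd]
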